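-- pv_equiv track=rewrite | github.com/RajeshDM/pddlstream | pddlstream/utils.py | generate_object_combinations
-- ===== SOURCE A (Python) =====
-- import itertools
--
-- def generate_object_combinations(certified,domain_types,domain_type_objects,domain_types_position,number_domains):
--     lists_to_use = [[certified[0][0]]]
--
--     #ic (lists_to_use)
--     #ic (domain_types)
--     #ic (domain_type_objects)
--     #lists_to_use_arguments_from_types = [domain_type_objects[domain] for domain in domain_types.keys() if domain in domain_type_objects]
--     #lists_to_use_arguments = [domain_type_objects[domain] for domain in domain_types.keys() if domain in domain_type_objects]
--     #ic (max(domain_types_position.values()))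
--     lists_to_use_arguments = [None] * number_domains
--
--     #for i,argument_lists in enumerate(lists_to_use_arguments):
--     #
--     #    domain_types_position
--     for domain,positions in domain_types_position.items():
--         for position in positions :
--             #if len(domain_type_objects[domain]) > 1 :
--             #    lists_to_use_arguments[position] = [domain_type_objects[domain]]
--             #else :
--             lists_to_use_arguments[position] = domain_type_objects[domain]
--
--     lists_to_use += lists_to_use_arguments
--     #ic (lists_to_use_arguments)
--     #ic (lists_to_use)
--     #ic (lists_to_use)
--     facts = list(itertools.product(*lists_to_use))
--     #ic (facts)
--     #ic (len(facts))
--     new_facts = []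
--     for fact in facts:
--         new_fact = []
--         for elem in fact:
--             if type(elem) != list:
--                 new_fact.append(elem)
--             else :
--                 for obj in elem:
--                     new_fact.append(obj)
--         new_facts.append(tuple(new_fact))
--     #ic (new_facts)
--     return new_facts
-- ===== SOURCE B (Python) =====
-- def generate_object_combinations(certified,domain_types,domain_type_objects,domain_types_position,number_domains):
--     lists_to_use = [[certified[0][0]]]
--     slots = [None] * number_domains
--     for domain, positions in domain_types_position.items():
--         for position in positions:
--             slots[position] = domain_type_objects[domain]
--     lists_to_use += slots
--     total = 1
--     for lst in lists_to_use:
--         total *= len(lst)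
--     new_facts = []
--     for k in range(total):
--         fact = []
--         idx = k
--         for lst in reversed(lists_to_use):
--             idx, d = divmod(idx, len(lst))
--             elem = lst[d]
--             if type(elem) == list:
--                 fact = list(elem) + fact
--             else:
--                 fact = [elem] + fact
--         new_facts.append(tuple(fact))
--     return new_facts
-- ===== Notes on version B (the rewrite author's own statement) =====
-- stated objective: alternative
-- what changed: Replaces itertools.product plus a separate flatten pass by mixed-radix index decoding: B computes the total count as the product of the pool lengths and, for each index k in range(total), reconstructs the k-th combination directly by repeated divmod over the pool lengths (rightmost digit fastest), flattening as it goes.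
import Mathlib
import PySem

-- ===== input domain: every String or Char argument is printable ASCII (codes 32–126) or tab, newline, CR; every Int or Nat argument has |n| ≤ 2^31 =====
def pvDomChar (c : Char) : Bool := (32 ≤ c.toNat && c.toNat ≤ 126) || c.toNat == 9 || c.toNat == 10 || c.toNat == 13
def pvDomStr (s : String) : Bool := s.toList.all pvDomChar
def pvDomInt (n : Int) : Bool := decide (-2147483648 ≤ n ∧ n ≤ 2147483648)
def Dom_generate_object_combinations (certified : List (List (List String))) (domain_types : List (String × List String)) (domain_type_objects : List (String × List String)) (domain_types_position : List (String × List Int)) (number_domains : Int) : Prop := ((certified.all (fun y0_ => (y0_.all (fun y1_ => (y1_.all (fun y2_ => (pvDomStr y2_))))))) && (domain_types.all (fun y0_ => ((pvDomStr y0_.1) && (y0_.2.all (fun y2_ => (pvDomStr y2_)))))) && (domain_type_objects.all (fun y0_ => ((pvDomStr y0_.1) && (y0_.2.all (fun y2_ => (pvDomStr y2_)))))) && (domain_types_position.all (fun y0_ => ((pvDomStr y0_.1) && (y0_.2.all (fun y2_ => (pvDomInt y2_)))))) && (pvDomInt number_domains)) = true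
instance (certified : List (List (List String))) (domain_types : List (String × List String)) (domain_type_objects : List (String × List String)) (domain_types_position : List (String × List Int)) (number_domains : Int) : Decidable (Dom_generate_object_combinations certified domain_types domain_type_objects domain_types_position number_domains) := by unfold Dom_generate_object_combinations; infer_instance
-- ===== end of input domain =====

-- B replaces itertools.product + a separate flatten pass by mixed-radix index decoding
-- (alternative algorithm; same asymptotic cost).

-- shared by both ports: Python's construction of lists_to_use (the [None]*number_domains
-- slots filled from domain_types_position / domain_type_objects) is identical in A and B.
-- A Python fact element is either a list of strings (certified[0][0]) or a string.
def gocExt (e : Sum (List String) String) : List String :=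
  match e with
  | Sum.inl l => l
  | Sum.inr s => [s]

def gocSlots (domain_type_objects : List (String × List String))
    (domain_types_position : List (String × List Int)) (number_domains : Int) :
    List (Option (List String)) :=
  (PySem.Dict.ofList domain_types_position).items.foldl
    (fun slots p =>
      p.2.foldl
        (fun slots pos =>
          PySem.List.pySetD slots pos (some ((PySem.Dict.ofList domain_type_objects).getD p.1 [])))
        slots)
    (List.replicate number_domains.toNat none)

-- an unset (None) slot makes Python raise TypeError; the total port reads it as the empty
-- list (Pre_ excludes those inputs)
def gocLists (certified : List (List (List String)))
    (domain_type_objects : List (String × List String))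
    (domain_types_position : List (String × List Int)) (number_domains : Int) :
    List (List (Sum (List String) String)) :=
  [Sum.inl (PySem.List.pyGetD (PySem.List.pyGetD certified 0 []) 0 [])] ::
    (gocSlots domain_type_objects domain_types_position number_domains).map
      (fun o => (o.getD []).map Sum.inr)

-- ===== PORT A =====
-- itertools.product(*lists_to_use)
def gocProduct {α : Type} : List (List α) → List (List α)
  | [] => [[]]
  | l :: ls => l.flatMap (fun x => (gocProduct ls).map (fun r => x :: r))

-- the inner 'for elem in fact: append / extend' loop
def gocFlatten (fact : List (Sum (List String) String)) : List String :=
  fact.foldl (fun acc e => acc ++ gocExt e) []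

def generate_object_combinations (certified : List (List (List String))) (domain_types : List (String × List String)) (domain_type_objects : List (String × List String)) (domain_types_position : List (String × List Int)) (number_domains : Int) : List (List String) :=
  (gocProduct (gocLists certified domain_type_objects domain_types_position number_domains)).map
    gocFlatten

-- ===== PORT B =====
-- Source B's 'total *= len(lst)' loop
def gocTotal (ls : List (List (Sum (List String) String))) : Nat :=
  ls.foldl (fun t l => t * l.length) 1

-- Source B's inner loop for one k: 'for lst in reversed(lists_to_use): idx, d = divmod(idx, len(lst));
-- fact = piece + fact'.  Exact: k < total forces every len > 0, so divmod is Nat divmod and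
-- lst[d] (0 ≤ d = idx % len < len) is getD.
def gocDecode (ls : List (List (Sum (List String) String))) (k : Nat) : List String :=
  (ls.reverse.foldl
      (fun (st : Nat × List String) lst =>
        (st.1 / lst.length,
          gocExt (lst.getD (st.1 % lst.length) (Sum.inr "")) ++ st.2))
      (k, ([] : List String))).2

def generate_object_combinations_alt (certified : List (List (List String))) (domain_types : List (String × List String)) (domain_type_objects : List (String × List String)) (domain_types_position : List (String × List Int)) (number_domains : Int) : List (List String) :=
  (List.range
      (gocTotal (gocLists certified domain_type_objects domain_types_position number_domains))).map
    (gocDecode (gocLists certified domain_type_objects domain_types_position number_domains))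

-- ===== PRECONDITION & SPEC =====
-- Pre_ excludes exactly the inputs on which Python A raises: IndexError on certified[0][0],
-- KeyError on a domain missing from domain_type_objects, IndexError on a position outside
-- [-number_domains, number_domains) (or a negative number_domains), and TypeError when some
-- slot of [None]*number_domains is never assigned a list (a negative number_domains just
-- yields an empty slot list, so it is excluded only when some position is written).
def Pre_generate_object_combinations (certified : List (List (List String))) (domain_types : List (String × List String)) (domain_type_objects : List (String × List String)) (domain_types_position : List (String × List Int)) (number_domains : Int) : Prop :=
  certified ≠ [] ∧ certified.getD 0 [] ≠ [] ∧
  (∀ p ∈ (PySem.Dict.ofList domain_types_position).items, ∀ pos ∈ p.2,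
      (PySem.Dict.ofList domain_type_objects).contains p.1 = true ∧
      -(number_domains.toNat : Int) ≤ pos ∧ pos < (number_domains.toNat : Int)) ∧
  (∀ i ∈ List.range number_domains.toNat,
      ∃ p ∈ (PySem.Dict.ofList domain_types_position).items, ∃ pos ∈ p.2,
        (if pos < 0 then pos + (number_domains.toNat : Int) else pos) = (i : Int))
instance (certified : List (List (List String))) (domain_types : List (String × List String)) (domain_type_objects : List (String × List String)) (domain_types_position : List (String × List Int)) (number_domains : Int) : Decidable (Pre_generate_object_combinations certified domain_types domain_type_objects domain_types_position number_domains) := by unfold Pre_generate_object_combinations; infer_instance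

def pvWitness_generate_object_combinations : List (List (List String)) × (List (String × List String)) × (List (String × List String)) × (List (String × List Int)) × Int :=
  ([[["x"]]], [], [("t", ["a", "b"])], [("t", [0])], 1)

def Spec_generate_object_combinations (certified : List (List (List String))) (domain_types : List (String × List String)) (domain_type_objects : List (String × List String)) (domain_types_position : List (String × List Int)) (number_domains : Int) (out : List (List String)) : Prop := out = generate_object_combinations_alt certified domain_types domain_type_objects domain_types_position number_domains
instance (certified : List (List (List String))) (domain_types : List (String × List String)) (domain_type_objects : List (String × List String)) (domain_types_position : List (String × List Int)) (number_domains : Int) (out : List (List String)) : Decidable (Spec_generate_object_combinations certified domain_types domain_type_objects domain_types_position number_domains out) := by unfold Spec_generate_object_combinations; infer_instance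

-- ===== CLAIM =====
def Claim_equal_generate_object_combinations : Prop := ∀ (certified : List (List (List String))) (domain_types : List (String × List String)) (domain_type_objects : List (String × List String)) (domain_types_position : List (String × List Int)) (number_domains : Int), Dom_generate_object_combinations certified domain_types domain_type_objects domain_types_position number_domains → Pre_generate_object_combinations certified domain_types domain_type_objects domain_types_position number_domains → Spec_generate_object_combinations certified domain_types domain_type_objects domain_types_position number_domains (generate_object_combinations certified domain_types domain_type_objects domain_types_position number_domains)

-- ===== LEMMAS AND PROOFS =====
lemma gocFlatten_eq_flatMap (fact : List (Sum (List String) String)) :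
    gocFlatten fact = fact.flatMap gocExt := by
  simpa [gocFlatten] using PySem.List.foldl_append_eq_flatMap gocExt fact []

-- structural form of B's inner divmod loop
def gocMdec : List (List (Sum (List String) String)) → Nat → List String
  | [], _ => []
  | l :: rs, k =>
      gocMdec rs (k / l.length) ++ gocExt (l.getD (k % l.length) (Sum.inr ""))

lemma gocDecode_foldl (rs : List (List (Sum (List String) String))) (k : Nat)
    (fact : List String) :
    (rs.foldl
        (fun (st : Nat × List String) lst =>
          (st.1 / lst.length,
            gocExt (lst.getD (st.1 % lst.length) (Sum.inr "")) ++ st.2))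
        (k, fact)).2 = gocMdec rs k ++ fact := by
  induction rs generalizing k fact with
  | nil => simp [gocMdec]
  | cons l rs ih =>
      simp only [List.foldl_cons]
      rw [ih]
      simp [gocMdec, List.append_assoc]

def gocP (rs : List (List (Sum (List String) String))) : Nat := (rs.map List.length).prod

lemma gocTotal_aux (ls : List (List (Sum (List String) String))) :
    ∀ (t : Nat), ls.foldl (fun t l => t * l.length) t = t * gocP ls := by
  induction ls with
  | nil => intro t; simp [gocP]
  | cons l ls ih =>
      intro t
      simp only [List.foldl_cons]
      rw [ih]
      simp [gocP]
      ring

lemma gocTotal_eq (ls : List (List (Sum (List String) String))) :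
    gocTotal ls = gocP ls := by
  simpa [gocTotal] using gocTotal_aux ls 1

lemma flatMap_single {α β : Type} (f : α → β) (l : List α) :
    l.flatMap (fun x => [f x]) = l.map f := by
  induction l with
  | nil => rfl
  | cons a l ih => simp [ih]

lemma gocProduct_append_singleton {α : Type} (xs : List (List α)) (l : List α) :
    gocProduct (xs ++ [l]) =
      (gocProduct xs).flatMap (fun r => l.map (fun x => r ++ [x])) := by
  induction xs with
  | nil =>
      simp only [List.nil_append, gocProduct]
      simpa using flatMap_single (fun x => ([x] : List α)) l
  | cons y xs ih =>
      simp [gocProduct, ih, List.flatMap_assoc, List.map_flatMap, List.flatMap_map,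
        Function.comp_def, List.map_map]

lemma range_mul_map {α : Type} (a b : Nat) (f : Nat → α) :
    (List.range (b * a)).map f =
      (List.range b).flatMap (fun q => (List.range a).map (fun d => f (q * a + d))) := by
  induction b with
  | zero => simp
  | succ b ih =>
      have : (b + 1) * a = b * a + a := by ring
      rw [this, List.range_add, List.map_append, ih, List.range_succ, List.flatMap_append]
      simp [List.map_map, Function.comp_def, Nat.add_comm, Nat.mul_comm]

lemma map_range_getD {α : Type} [Inhabited α] (l : List α) (dflt : α) :
    (List.range l.length).map (fun d => l.getD d dflt) = l := by
  apply List.ext_getElem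
  · simp
  · intro i h1 h2
    simp [List.getD_eq_getElem?_getD, h2]

lemma gocMdec_range (rs : List (List (Sum (List String) String))) :
    (List.range (gocP rs)).map (gocMdec rs) =
      (gocProduct rs.reverse).map (fun r => r.flatMap gocExt) := by
  induction rs with
  | nil => simp [gocP, gocMdec, gocProduct]
  | cons l rs ih =>
      have hP : gocP (l :: rs) = gocP rs * l.length := by
        simp [gocP, List.prod_cons, Nat.mul_comm]
      rw [hP, range_mul_map]
      have hinner : ∀ q, (List.range l.length).map (fun d => gocMdec (l :: rs) (q * l.length + d))
          = l.map (fun x => gocMdec rs q ++ gocExt x) := by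
        intro q
        have : ∀ d ∈ List.range l.length,
            gocMdec (l :: rs) (q * l.length + d) = gocMdec rs q ++ gocExt (l.getD d (Sum.inr "")) := by
          intro d hd
          simp only [List.mem_range] at hd
          have hlen : 0 < l.length := Nat.lt_of_le_of_lt (Nat.zero_le d) hd
          have hdiv : (q * l.length + d) / l.length = q := by
            rw [Nat.mul_comm q l.length, Nat.mul_add_div hlen, Nat.div_eq_of_lt hd]
            omega
          have hmod : (q * l.length + d) % l.length = d := by
            rw [Nat.mul_comm q l.length, Nat.mul_add_mod, Nat.mod_eq_of_lt hd]
          simp [gocMdec, hdiv, hmod]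
        rw [List.map_congr_left this]
        conv_rhs => rw [← map_range_getD l (Sum.inr "")]
        simp [List.map_map, Function.comp_def]
      rw [List.flatMap_congr (fun q _ => hinner q)]
      have hrev : (l :: rs).reverse = rs.reverse ++ [l] := by simp
      rw [hrev, gocProduct_append_singleton]
      have hcong := congrArg
        (fun (L : List (List String)) => L.flatMap (fun m => l.map (fun x => m ++ gocExt x))) ih
      simpa [List.map_flatMap, List.flatMap_map, List.map_map, Function.comp_def] using hcong

-- ===== VERDICT =====
theorem generate_object_combinations_spec : Claim_equal_generate_object_combinations := by
  intro certified domain_types domain_type_objects domain_types_position number_domains _ _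
  unfold Spec_generate_object_combinations generate_object_combinations
    generate_object_combinations_alt
  set ls := gocLists certified domain_type_objects domain_types_position number_domains with hls
  have hdec : ∀ k, gocDecode ls k = gocMdec ls.reverse k := by
    intro k
    simpa [gocDecode] using gocDecode_foldl ls.reverse k []
  have hP : gocP ls = gocP ls.reverse := by
    unfold gocP; rw [List.map_reverse, List.prod_reverse]
  calc (gocProduct ls).map gocFlatten
      = (gocProduct ls).map (fun r => r.flatMap gocExt) :=
        List.map_congr_left (fun r _ => gocFlatten_eq_flatMap r)
    _ = (gocProduct ls.reverse.reverse).map (fun r => r.flatMap gocExt) := by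
        rw [List.reverse_reverse]
    _ = (List.range (gocP ls.reverse)).map (gocMdec ls.reverse) := (gocMdec_range ls.reverse).symm
    _ = (List.range (gocTotal ls)).map (gocDecode ls) := by
        rw [gocTotal_eq, hP]
        exact List.map_congr_left (fun k _ => (hdec k).symm)
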